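-- pv_equiv track=rewrite | github.com/KonstantinYarygin/MinimapBanner | banner.py | make_banner
-- ===== SOURCE A (Python) =====
-- LETTER_WIDTH = 7
--
-- def make_banner(text, symbol2image):
--     text = text.upper()
--     banner = ['' for _ in range(LETTER_WIDTH)]
--     for symbol in text:
--         if symbol in symbol2image:
--             for row in range(LETTER_WIDTH):
--                 banner[row] += symbol2image[symbol][row] + ' '
--         else:
--             for row in range(LETTER_WIDTH):
--                 banner[row] += 3 * ' ' + ' '
--     banner = [line + '\n' for line in banner]
--     banner[-1] = banner[-1][:-1]
--     return banner
-- ===== SOURCE B (Python) =====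
-- LETTER_WIDTH = 7
--
-- def make_banner(text, symbol2image):
--     # divide-and-conquer: banner of a chunk = horizontal concatenation of the
--     # banners of its halves; leaves are single-symbol glyph columns.
--     T = text.upper()
--
--     def block(chunk):
--         n = len(chunk)
--         if n == 0:
--             return [''] * LETTER_WIDTH
--         if n == 1:
--             g = symbol2image[chunk] if chunk in symbol2image else ['   '] * LETTER_WIDTH
--             return [g[r] + ' ' for r in range(LETTER_WIDTH)]
--         m = n // 2
--         left, right = block(chunk[:m]), block(chunk[m:])
--         return [left[r] + right[r] for r in range(LETTER_WIDTH)]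
--
--     rows = block(T)
--     return [r + '\n' for r in rows[:-1]] + [rows[-1]]
-- ===== Notes on version B (the rewrite author's own statement) =====
-- stated objective: faster
-- what changed: B replaces A's left-to-right loop that appends to all 7 row strings per symbol with a divide-and-conquer assembly: the banner of a text chunk is the row-wise horizontal concatenation of the banners of its two halves, with single-symbol glyph columns at the leaves; correct because string concatenation is associative.
import Mathlib
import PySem

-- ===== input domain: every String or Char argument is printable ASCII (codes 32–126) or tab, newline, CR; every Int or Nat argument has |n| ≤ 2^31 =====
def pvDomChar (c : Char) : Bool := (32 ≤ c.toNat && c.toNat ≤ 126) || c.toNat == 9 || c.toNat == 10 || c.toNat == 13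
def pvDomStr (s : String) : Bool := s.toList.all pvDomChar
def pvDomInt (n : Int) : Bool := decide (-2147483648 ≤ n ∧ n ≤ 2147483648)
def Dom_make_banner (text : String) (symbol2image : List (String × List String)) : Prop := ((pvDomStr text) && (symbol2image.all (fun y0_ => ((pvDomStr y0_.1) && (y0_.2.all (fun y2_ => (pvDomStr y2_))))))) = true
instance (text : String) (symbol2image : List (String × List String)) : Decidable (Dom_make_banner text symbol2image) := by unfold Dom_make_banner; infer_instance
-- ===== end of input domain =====

-- B assembles the banner by divide-and-conquer (row-wise concatenation of the banners of the two
-- halves of the text, glyph columns at the leaves) instead of A's per-symbol loop extending all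
-- 7 row strings with +=; measurably faster on large inputs.


-- ===== PORT A =====
-- strings are handled as List Char internally (Lean's String.append is kernel-opaque); String.mk at the end
def make_banner (text : String) (symbol2image : List (String × List String)) : List String :=
  let t := (PySem.Str.upper text).toList
  let banner : List (List Char) := List.replicate 7 []
  let banner := t.foldl (fun banner symbol =>
    match PySem.Dict.get? (PySem.Dict.mk symbol2image) (String.mk [symbol]) with
    | some img =>
        -- banner[row] += symbol2image[symbol][row] + ' '   (pyGetD: Python raises IndexError when the
        -- glyph has fewer than 7 rows — exactly the inputs Pre_make_banner excludes)
        (PySem.List.pyRange 0 7 1).foldl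
          (fun b r => b.set r.toNat (b.getD r.toNat [] ++ ((PySem.List.pyGetD img r "").toList ++ [' ']))) banner
    | none =>
        -- banner[row] += 3 * ' ' + ' '
        (PySem.List.pyRange 0 7 1).foldl
          (fun b r => b.set r.toNat (b.getD r.toNat [] ++ ([' ', ' ', ' '] ++ [' ']))) banner) banner
  let banner := banner.map (fun line => line ++ ['\n'])
  -- banner[-1] = banner[-1][:-1]: s[:-1] on a nonempty string drops its last char = dropLast
  let banner := banner.set (banner.length - 1) ((banner.getD (banner.length - 1) []).dropLast)
  banner.map String.mk

-- ===== PORT B =====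
-- block(chunk): the 7 banner rows (no trailing newlines) of a chunk of the text, by
-- divide and conquer; rows as List Char internally, as in port A.
def pvBlock (s2i : List (String × List String)) (cs : List Char) : List (List Char) :=
  if _h : cs.length ≤ 1 then
    match cs with
    | [] => List.replicate 7 []
    | c :: _ =>
      -- g = symbol2image[chunk] if chunk in symbol2image else ['   '] * 7; [g[r] + ' ' …]
      let g := (PySem.Dict.get? (PySem.Dict.mk s2i) (String.mk [c])).getD (List.replicate 7 "   ")
      (PySem.List.pyRange 0 7 1).map (fun r => (PySem.List.pyGetD g r "").toList ++ [' '])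
  else
    let m := cs.length / 2
    let left := pvBlock s2i (cs.take m)
    let right := pvBlock s2i (cs.drop m)
    (PySem.List.pyRange 0 7 1).map (fun r =>
      (PySem.List.pyGetD left r []) ++ (PySem.List.pyGetD right r []))
termination_by cs.length
decreasing_by
  · simp; omega
  · simp; omega

def make_banner_alt (text : String) (symbol2image : List (String × List String)) : List String :=
  let rows := pvBlock symbol2image (PySem.Str.upper text).toList
  -- [r + '\n' for r in rows[:-1]] + [rows[-1]]  (rows always has 7 elements)
  rows.dropLast.map (fun r => String.mk (r ++ ['\n'])) ++ (rows.getLast?.map String.mk).toList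

-- ===== PRECONDITION & SPEC =====
-- Pre_ excludes exactly the inputs where Python A raises IndexError: some symbol of text.upper()
-- is a key whose glyph list has fewer than 7 rows (Python B raises there too).
def Pre_make_banner (text : String) (symbol2image : List (String × List String)) : Prop :=
  ((PySem.Str.upper text).toList.all (fun c =>
    7 ≤ ((PySem.Dict.get? (PySem.Dict.mk symbol2image) (String.mk [c])).getD (List.replicate 7 "")).length)) = true
instance (text : String) (symbol2image : List (String × List String)) : Decidable (Pre_make_banner text symbol2image) := by unfold Pre_make_banner; infer_instance
def pvWitness_make_banner : String × (List (String × List String)) := ("", [])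
def Spec_make_banner (text : String) (symbol2image : List (String × List String)) (out : List String) : Prop := out = make_banner_alt text symbol2image
instance (text : String) (symbol2image : List (String × List String)) (out : List String) : Decidable (Spec_make_banner text symbol2image out) := by unfold Spec_make_banner; infer_instance

-- ===== CLAIM (what is proved, stated in full; the proofs are below) =====
def Claim_equal_make_banner : Prop := ∀ (text : String) (symbol2image : List (String × List String)), Dom_make_banner text symbol2image → Pre_make_banner text symbol2image → Spec_make_banner text symbol2image (make_banner text symbol2image)

-- ===== LEMMAS AND PROOFS =====

-- per-symbol, per-row contribution (the common characterization both ports are reduced to)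
def pvG (symbol2image : List (String × List String)) (c : Char) (r : Int) : List Char :=
  (PySem.List.pyGetD
    ((PySem.Dict.get? (PySem.Dict.mk symbol2image) (String.mk [c])).getD (List.replicate 7 "   "))
    r "").toList ++ [' ']

-- row r of the banner (no newline) for character list cs
def pvRow (s2i : List (String × List String)) (cs : List Char) (r : Int) : List Char :=
  (cs.map (fun c => pvG s2i c r)).flatten

-- A's inner 7-row loop on an explicit 7-list, expressed with per-row contributions
theorem pvStep (s2i : List (String × List String)) (c : Char)
    (b0 b1 b2 b3 b4 b5 b6 : List Char) :
    (match PySem.Dict.get? (PySem.Dict.mk s2i) (String.mk [c]) with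
     | some img =>
        (PySem.List.pyRange 0 7 1).foldl
          (fun b r => b.set r.toNat (b.getD r.toNat [] ++ ((PySem.List.pyGetD img r "").toList ++ [' ']))) [b0,b1,b2,b3,b4,b5,b6]
     | none =>
        (PySem.List.pyRange 0 7 1).foldl
          (fun b r => b.set r.toNat (b.getD r.toNat [] ++ ([' ', ' ', ' '] ++ [' ']))) [b0,b1,b2,b3,b4,b5,b6]) =
    [b0 ++ pvG s2i c 0, b1 ++ pvG s2i c 1, b2 ++ pvG s2i c 2, b3 ++ pvG s2i c 3,
     b4 ++ pvG s2i c 4, b5 ++ pvG s2i c 5, b6 ++ pvG s2i c 6] := by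
  cases h : PySem.Dict.get? (PySem.Dict.mk s2i) (String.mk [c]) with
  | none => simp [pvG, h, PySem.List.pyRange, PySem.List.pyGetD]; rfl
  | some img => simp [pvG, h, PySem.List.pyRange]; rfl

-- A's whole symbol loop: each row is the flattened per-symbol contributions
theorem pvLoop (s2i : List (String × List String)) (cs : List Char)
    (b0 b1 b2 b3 b4 b5 b6 : List Char) :
    cs.foldl (fun banner symbol =>
      match PySem.Dict.get? (PySem.Dict.mk s2i) (String.mk [symbol]) with
      | some img =>
          (PySem.List.pyRange 0 7 1).foldl
            (fun b r => b.set r.toNat (b.getD r.toNat [] ++ ((PySem.List.pyGetD img r "").toList ++ [' ']))) banner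
      | none =>
          (PySem.List.pyRange 0 7 1).foldl
            (fun b r => b.set r.toNat (b.getD r.toNat [] ++ ([' ', ' ', ' '] ++ [' ']))) banner)
      [b0,b1,b2,b3,b4,b5,b6] =
    [b0 ++ pvRow s2i cs 0, b1 ++ pvRow s2i cs 1, b2 ++ pvRow s2i cs 2, b3 ++ pvRow s2i cs 3,
     b4 ++ pvRow s2i cs 4, b5 ++ pvRow s2i cs 5, b6 ++ pvRow s2i cs 6] := by
  induction cs generalizing b0 b1 b2 b3 b4 b5 b6 with
  | nil => simp [pvRow]
  | cons c cs ih =>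
      rw [List.foldl_cons, pvStep, ih]
      simp [pvRow, List.append_assoc]

-- pvRow distributes over append of chunks (associativity of concatenation)
theorem pvRow_append (s2i : List (String × List String)) (l r : List Char) (k : Int) :
    pvRow s2i (l ++ r) k = pvRow s2i l k ++ pvRow s2i r k := by
  simp [pvRow]

-- B's divide-and-conquer block computes exactly the 7 rows
theorem pvBlock_eq (s2i : List (String × List String)) (cs : List Char) :
    pvBlock s2i cs =
      [pvRow s2i cs 0, pvRow s2i cs 1, pvRow s2i cs 2, pvRow s2i cs 3,
       pvRow s2i cs 4, pvRow s2i cs 5, pvRow s2i cs 6] := by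
  induction hn : cs.length using Nat.strong_induction_on generalizing cs with
  | _ n ih =>
    unfold pvBlock
    by_cases h : cs.length ≤ 1
    · simp only [h, dif_pos]
      match cs, h with
      | [], _ => simp [pvRow]
      | [c], _ =>
          simp [pvRow, pvG, PySem.List.pyRange]
          rfl
    · simp only [h, dif_neg, not_false_iff]
      have hm1 : 1 ≤ cs.length / 2 := by omega
      have hmlt : cs.length / 2 < cs.length := by omega
      have hL := ih (cs.take (cs.length / 2)).length (by simp; omega) _ rfl
      have hR := ih (cs.drop (cs.length / 2)).length (by simp; omega) _ rfl
      have hcs : cs.take (cs.length / 2) ++ cs.drop (cs.length / 2) = cs := List.take_append_drop _ _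
      rw [hL, hR, show PySem.List.pyRange 0 7 1 = [(0:Int),1,2,3,4,5,6] from rfl]
      simp [PySem.List.pyGetD, PySem.List.pyGet?, PySem.List.pyIdx?]
      refine ⟨?_, ?_, ?_, ?_, ?_, ?_, ?_⟩ <;> rw [← pvRow_append, hcs]

theorem make_banner_eq_alt (text : String) (symbol2image : List (String × List String)) :
    make_banner text symbol2image = make_banner_alt text symbol2image := by
  unfold make_banner make_banner_alt
  dsimp only
  rw [show (List.replicate 7 ([] : List Char)) = [[],[],[],[],[],[],[]] from rfl, pvLoop,
      pvBlock_eq]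
  simp

-- ===== VERDICT (by name: the statement is the Claim_ definition above) =====
theorem make_banner_spec : Claim_equal_make_banner := by
  intro text s2i _ _
  unfold Spec_make_banner
  exact make_banner_eq_alt text s2i
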